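-- pv_equiv track=rewrite | github.com/Bahaa-Almasri/Wikipedia-Semi-Structured-Infobox-Data-Collection-Comparison-and-Differencing | src/core/patch/path_patch.py | _find_child_by_label
-- ===== SOURCE A (Python) =====
-- from typing import Any, Dict, List, Optional, Set
--
-- def _find_child_by_label(node: Dict[str, Any], label: str) -> Optional[int]:
--     """Return index of child with given label, or None. Prefer exact match."""
--     children = node.get("children") or []
--     for i, child in enumerate(children):
--         if child.get("label") == label:
--             return i
--     # Fallback: match base (e.g. "languages_item" matches "languages_item[0]")
--     base = label.split("[", 1)[0]
--     for i, child in enumerate(children):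
--         child_base = (child.get("label") or "").split("[", 1)[0]
--         if child_base == base:
--             return i
--     return None
-- ===== SOURCE B (Python) =====
-- from typing import Any, Dict, List, Optional, Set
--
-- def _find_child_by_label(node: Dict[str, Any], label: str) -> Optional[int]:
--     """Single pass: return immediately on exact match, remember first base match."""
--     children = node.get("children") or []
--     base = label.split("[", 1)[0]
--     fallback = None
--     for i, child in enumerate(children):
--         cl = child.get("label")
--         if cl == label:
--             return i
--         if fallback is None and (cl or "").split("[", 1)[0] == base:
--             fallback = i
--     return fallback
-- ===== Notes on version B (the rewrite author's own statement) =====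
-- stated objective: simpler
-- what changed: Replaced A's two full scans (exact-match pass, then base-match pass) with a single enumerate loop that returns immediately on an exact match and keeps the first base match as a fallback accumulator.
import Mathlib
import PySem

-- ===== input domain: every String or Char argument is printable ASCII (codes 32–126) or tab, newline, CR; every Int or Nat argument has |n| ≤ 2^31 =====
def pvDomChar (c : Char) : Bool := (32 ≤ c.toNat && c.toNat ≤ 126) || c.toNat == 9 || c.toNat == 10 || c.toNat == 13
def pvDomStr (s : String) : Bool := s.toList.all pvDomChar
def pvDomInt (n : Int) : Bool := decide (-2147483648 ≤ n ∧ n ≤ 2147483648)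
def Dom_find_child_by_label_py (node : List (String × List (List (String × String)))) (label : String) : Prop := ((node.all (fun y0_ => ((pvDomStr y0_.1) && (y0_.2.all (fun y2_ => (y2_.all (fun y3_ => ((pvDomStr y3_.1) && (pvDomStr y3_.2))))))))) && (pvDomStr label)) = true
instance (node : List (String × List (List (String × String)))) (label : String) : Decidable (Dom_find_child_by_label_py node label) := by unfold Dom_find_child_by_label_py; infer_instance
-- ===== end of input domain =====

-- B replaces A's two full scans with one loop that returns on an exact match and keeps the
-- first base match as a fallback (objective: simpler, one pass instead of two).

-- shared helper: s.split("[", 1)[0]  (split always yields a nonempty list, so [0] never raises;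
-- the default "" is unreachable)
def pvBase (s : String) : String :=
  (((PySem.Str.splitMax? s "[" 1).getD []).headD "")

-- ===== PORT A =====
-- first loop: `for i, child in enumerate(children): if child.get("label") == label: return i`
def pvFindExact (children : List (List (String × String))) (label : String) (i : Int) : Option Int :=
  match children with
  | [] => none
  | c :: cs =>
    if (PySem.Dict.mk c).get? "label" = some label then some i
    else pvFindExact cs label (i + 1)

-- second loop: `(child.get("label") or "").split("[",1)[0] == base` (`or ""` = getD "", since "" is falsy too)
def pvFindBase (children : List (List (String × String))) (base : String) (i : Int) : Option Int :=
  match children with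
  | [] => none
  | c :: cs =>
    if pvBase (((PySem.Dict.mk c).get? "label").getD "") = base then some i
    else pvFindBase cs base (i + 1)

def find_child_by_label_py (node : List (String × List (List (String × String)))) (label : String) : Option Int :=
  -- `node.get("children") or []` : `or` with falsy [] equals getD []
  let children := ((PySem.Dict.mk node).get? "children").getD []
  match pvFindExact children label 0 with
  | some j => some j
  | none => pvFindBase children (pvBase label) 0

-- ===== PORT B =====
-- single loop with fallback accumulator (Source B)
def pvScan (children : List (List (String × String))) (label base : String) (i : Int)
    (fallback : Option Int) : Option Int :=
  match children with
  | [] => fallback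
  | c :: cs =>
    let cl := (PySem.Dict.mk c).get? "label"
    if cl = some label then some i
    else if fallback = none ∧ pvBase (cl.getD "") = base then pvScan cs label base (i + 1) (some i)
    else pvScan cs label base (i + 1) fallback

def find_child_by_label_py_alt (node : List (String × List (List (String × String)))) (label : String) : Option Int :=
  let children := ((PySem.Dict.mk node).get? "children").getD []
  pvScan children label (pvBase label) 0 none

-- ===== PRECONDITION & SPEC =====
def Spec_find_child_by_label_py (node : List (String × List (List (String × String)))) (label : String) (out : Option Int) : Prop := out = find_child_by_label_py_alt node label
instance (node : List (String × List (List (String × String)))) (label : String) (out : Option Int) : Decidable (Spec_find_child_by_label_py node label out) := by unfold Spec_find_child_by_label_py; infer_instance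

-- ===== CLAIM (what is proved, stated in full; the proofs are below) =====
def Claim_equal_find_child_by_label_py : Prop := ∀ (node : List (String × List (List (String × String)))) (label : String), Dom_find_child_by_label_py node label → Spec_find_child_by_label_py node label (find_child_by_label_py node label)

-- ===== LEMMAS AND PROOFS =====

-- invariant of B's single loop: it returns the first exact match if any, else the
-- fallback if already set, else the first base match
theorem pvScan_eq (children : List (List (String × String))) (label base : String) :
    ∀ (i : Int) (fb : Option Int),
    pvScan children label base i fb =
      match pvFindExact children label i with
      | some j => some j
      | none => match fb with
                | some j => some j
                | none => pvFindBase children base i := by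
  induction children with
  | nil => intro i fb; cases fb <;> simp [pvScan, pvFindExact, pvFindBase]
  | cons c cs ih =>
    intro i fb
    simp only [pvScan]
    by_cases hx : (PySem.Dict.mk c).get? "label" = some label
    · simp [pvFindExact, hx]
    · rw [if_neg hx]
      by_cases hf : fb = none ∧ pvBase (((PySem.Dict.mk c).get? "label").getD "") = base
      · rw [if_pos hf, ih, hf.1]
        simp only [pvFindExact, pvFindBase, if_neg hx, if_pos hf.2]
      · rw [if_neg hf, ih]
        simp only [pvFindExact, if_neg hx]
        cases hfb : fb with
        | some j => cases pvFindExact cs label (i + 1) <;> rfl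
        | none =>
          have hb : ¬ pvBase (((PySem.Dict.mk c).get? "label").getD "") = base := by
            intro h; exact hf ⟨hfb, h⟩
          simp only [pvFindBase, if_neg hb]

-- ===== VERDICT (by name: the statement is the Claim_ definition above) =====
theorem find_child_by_label_py_spec : Claim_equal_find_child_by_label_py := by
  intro node label _
  unfold Spec_find_child_by_label_py find_child_by_label_py find_child_by_label_py_alt
  rw [pvScan_eq]
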